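-- pv_equiv track=rewrite | github.com/PramodKalahal/streamlit-app | src/utils.py | extract_objective_section
-- ===== SOURCE A (Python) =====
-- def extract_objective_section(text):
--     """
--     Extracts the objective or summary section from the resume text.
--     Looks for headers like 'Objective', 'Summary', 'Profile', etc.
--     """
--     headers = ['objective', 'summary', 'professional summary', 'profile', 'about me', 'career goal']
--     lines = text.split('\n')
--     objective_lines = []
--     found = False
--
--     for i, line in enumerate(lines):
--         clean_line = line.strip().lower()
--         if any(h in clean_line for h in headers) and len(clean_line) < 30:
--             found = True
--             continue
--
--         if found:
--             # If we hit another likely header, stop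
--             if len(line.strip()) > 0 and line.strip().isupper() and len(line.strip()) < 30:
--                 break
--             if i + 1 < len(lines) and len(lines[i+1].strip()) > 0 and lines[i+1].strip().isupper():
--                 objective_lines.append(line)
--                 break
--             objective_lines.append(line)
--
--             # Limit objective to 10 lines
--             if len(objective_lines) > 10:
--                 break
--
--     if found and objective_lines:
--         return "\n".join(objective_lines).strip()
--     return text[:500] # Fallback to first 500 chars
-- ===== SOURCE B (Python) =====
-- def extract_objective_section(text):
--     """
--     Extracts the objective or summary section from the resume text.
--     Table-driven version: pair each post-header line with its successor's
--     stripped form, filter out header-like lines, compute the cut position as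
--     the minimum of three independently located stop points (first short
--     all-uppercase line, first line whose successor is uppercase, the 11-line
--     cap), then slice.
--     """
--     headers = ['objective', 'summary', 'professional summary', 'profile', 'about me', 'career goal']
--
--     def is_header(line):
--         c = line.strip().lower()
--         return len(c) < 30 and any(h in c for h in headers)
--
--     lines = text.split('\n')
--     h = next((i for i, ln in enumerate(lines) if is_header(ln)), None)
--     if h is None:
--         return text[:500]
--
--     tail = lines[h + 1:]
--     nexts = [ln.strip() for ln in lines[h + 2:]] + ['']
--     body = [(ln, nx) for ln, nx in zip(tail, nexts) if not is_header(ln)]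
--
--     def shortupper(ln):
--         s = ln.strip()
--         return bool(s) and s.isupper() and len(s) < 30
--
--     c1 = next((k for k, (ln, _) in enumerate(body) if shortupper(ln)), len(body))
--     c2 = next((k + 1 for k, (_, nx) in enumerate(body) if nx and nx.isupper()), len(body))
--     picked = [ln for ln, _ in body[:min(c1, c2, 11)]]
--
--     if picked:
--         return "\n".join(picked).strip()
--     return text[:500]
-- ===== Notes on version B (the rewrite author's own statement) =====
-- stated objective: alternative
-- what changed: A's stateful found-flag loop with break/continue is replaced by a table-driven pipeline: zip each post-header line with its successor's stripped form, filter out header-like lines, compute the cut position as the minimum of three independently located stop points (first short all-uppercase line, first line with an uppercase successor, the 11-line cap), then slice and join.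
import Mathlib
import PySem

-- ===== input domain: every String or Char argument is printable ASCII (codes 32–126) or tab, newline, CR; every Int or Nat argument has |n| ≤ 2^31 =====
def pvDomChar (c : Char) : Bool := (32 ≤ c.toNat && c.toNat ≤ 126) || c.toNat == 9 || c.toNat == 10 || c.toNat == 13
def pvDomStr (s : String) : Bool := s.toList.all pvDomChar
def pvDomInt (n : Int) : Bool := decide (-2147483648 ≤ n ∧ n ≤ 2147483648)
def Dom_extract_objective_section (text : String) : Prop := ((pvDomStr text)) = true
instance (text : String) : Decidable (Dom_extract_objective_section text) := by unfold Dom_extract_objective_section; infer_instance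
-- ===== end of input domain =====

-- B replaces A's stateful flag-and-accumulator loop by a table-driven pipeline:
-- zip each post-header line with its successor's stripped form, filter out header-like
-- lines, compute the cut as the minimum of three independently located stop points,
-- and slice (alternative decomposition, same cost).

-- shared primitive port: Python str.isupper() — exact on the ASCII domain (cased chars there are exactly the letters):
-- at least one cased character and no lowercase character
def pvIsupper (s : String) : Bool :=
  s.toList.any PySem.Chars.isalpha && s.toList.all (fun c => !PySem.Chars.islower c)

def pvHeaders : List String :=
  ["objective", "summary", "professional summary", "profile", "about me", "career goal"]

-- ===== PORT A =====
-- A's single for-loop over enumerate(lines): found flag + accumulator; 'lines[i+1]' is the head of the remaining list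
def pvLoopA (found : Bool) (acc : List String) : List String → Bool × List String
  | [] => (found, acc)
  | line :: rest =>
    let clean := PySem.Str.lower (PySem.Str.strip line)
    if pvHeaders.any (fun h => PySem.Str.isIn h clean) && decide (PySem.Str.len clean < 30) then
      pvLoopA true acc rest
    else if found then
      if decide (PySem.Str.len (PySem.Str.strip line) > 0) && pvIsupper (PySem.Str.strip line)
          && decide (PySem.Str.len (PySem.Str.strip line) < 30) then
        (found, acc)
      else if (match rest.head? with
               | some nxt => decide (PySem.Str.len (PySem.Str.strip nxt) > 0) && pvIsupper (PySem.Str.strip nxt)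
               | none => false) then
        (found, acc ++ [line])
      else
        let acc' := acc ++ [line]
        if acc'.length > 10 then (found, acc') else pvLoopA found acc' rest
    else pvLoopA found acc rest

def extract_objective_section (text : String) : String :=
  let lines := (PySem.Str.split? text "\n").getD []
  let res := pvLoopA false [] lines
  if res.1 && !res.2.isEmpty then PySem.Str.strip (PySem.Str.join "\n" res.2)
  else PySem.Str.slice text none (some 500)

-- ===== PORT B =====
-- Source B's is_header
def pvIsHeaderB (line : String) : Bool :=
  let c := PySem.Str.lower (PySem.Str.strip line)
  decide (PySem.Str.len c < 30) && pvHeaders.any (fun h => PySem.Str.isIn h c)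

-- Source B's shortupper
def pvShortUpperB (ln : String) : Bool :=
  let s := PySem.Str.strip ln
  decide (PySem.Str.len s > 0) && pvIsupper s && decide (PySem.Str.len s < 30)

-- Source B's 'next((k for k,(ln,_) in enumerate(body) if shortupper(ln)), len(body))'
def pvC1 (body : List (String × String)) : Nat :=
  (body.findIdx? (fun p => pvShortUpperB p.1)).getD body.length

-- Source B's 'next((k+1 for k,(_,nx) in enumerate(body) if nx and nx.isupper()), len(body))'
def pvC2 (body : List (String × String)) : Nat :=
  ((body.findIdx? (fun p => decide (PySem.Str.len p.2 > 0) && pvIsupper p.2)).map (· + 1)).getD body.length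

def extract_objective_section_alt (text : String) : String :=
  let lines := (PySem.Str.split? text "\n").getD []
  match lines.findIdx? pvIsHeaderB with
  | none => PySem.Str.slice text none (some 500)
  | some h =>
    -- body = [(ln, nx) for ln, nx in zip(lines[h+1:], [s.strip() for s in lines[h+2:]] + ['']) if not is_header(ln)]
    let body := ((lines.drop (h + 1)).zip
        ((lines.drop (h + 2)).map PySem.Str.strip ++ [""])).filter (fun p => !pvIsHeaderB p.1)
    let picked := (body.take (min (min (pvC1 body) (pvC2 body)) 11)).map Prod.fst
    if !picked.isEmpty then PySem.Str.strip (PySem.Str.join "\n" picked)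
    else PySem.Str.slice text none (some 500)

-- ===== PRECONDITION & SPEC =====
def Spec_extract_objective_section (text : String) (out : String) : Prop := out = extract_objective_section_alt text
instance (text : String) (out : String) : Decidable (Spec_extract_objective_section text out) := by unfold Spec_extract_objective_section; infer_instance

-- ===== CLAIM (what is proved, stated in full; the proofs are below) =====
def Claim_equal_extract_objective_section : Prop := ∀ (text : String), Dom_extract_objective_section text → Spec_extract_objective_section text (extract_objective_section text)

-- ===== LEMMAS AND PROOFS =====

-- A's header condition is B's is_header (the two conjuncts commute)
lemma headerCond_eq (line : String) :
    (pvHeaders.any (fun h => PySem.Str.isIn h (PySem.Str.lower (PySem.Str.strip line)))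
      && decide (PySem.Str.len (PySem.Str.lower (PySem.Str.strip line)) < 30)) = pvIsHeaderB line := by
  simp [pvIsHeaderB, Bool.and_comm]

-- once found, A's loop keeps found = true
lemma pvLoopA_fst_true (l : List String) : ∀ acc, (pvLoopA true acc l).1 = true := by
  induction l with
  | nil => intro acc; simp [pvLoopA]
  | cons line rest ih =>
    intro acc
    simp only [pvLoopA]
    split_ifs <;> simp [ih]

-- A's pre-header phase is B's locating pass
lemma find_eq (lines : List String) :
    pvLoopA false [] lines =
      (match lines.findIdx? pvIsHeaderB with
       | none => (false, [])
       | some k => pvLoopA true [] (lines.drop (k + 1))) := by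
  induction lines with
  | nil => simp [pvLoopA, List.findIdx?, List.findIdx?.go]
  | cons line rest ih =>
    rw [List.findIdx?_cons]
    by_cases hh : pvIsHeaderB line = true
    · simp only [pvLoopA, headerCond_eq, hh, if_pos]
      simp
    · simp only [pvLoopA, headerCond_eq, hh, if_neg, Bool.false_eq_true, not_false_iff]
      rw [ih]
      cases hrest : rest.findIdx? pvIsHeaderB with
      | none => simp
      | some k => simp [List.drop_succ_cons]

-- the stripped successor of the head of a list ('' at the end)
def pvNx : List String → String
  | [] => ""
  | y :: _ => PySem.Str.strip y

-- B's zip-filter table, written on a single list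
def pvBody (l : List String) : List (String × String) :=
  (l.zip (l.tail.map PySem.Str.strip ++ [""])).filter (fun p => !pvIsHeaderB p.1)

lemma pvBody_cons (x : String) (r : List String) :
    pvBody (x :: r) = if pvIsHeaderB x then pvBody r else (x, pvNx r) :: pvBody r := by
  cases r with
  | nil => by_cases h : pvIsHeaderB x = true <;> simp [pvBody, pvNx, h]
  | cons y r' => by_cases h : pvIsHeaderB x = true <;> simp [pvBody, pvNx, h]

-- A's lookahead match equals the 'nx' test on pvNx
lemma look_eq (rest : List String) :
    (match rest.head? with
     | some nxt => decide (PySem.Str.len (PySem.Str.strip nxt) > 0) && pvIsupper (PySem.Str.strip nxt)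
     | none => false)
    = (decide (PySem.Str.len (pvNx rest) > 0) && pvIsupper (pvNx rest)) := by
  cases rest <;> simp [pvNx, PySem.Str.len, PySem.Str.strip]

lemma pvC1_cons_false (p : String × String) (b : List (String × String))
    (h : pvShortUpperB p.1 = false) : pvC1 (p :: b) = pvC1 b + 1 := by
  simp only [pvC1, List.findIdx?_cons, h, Bool.false_eq_true, if_false]
  cases hb : b.findIdx? (fun p => pvShortUpperB p.1) <;> simp [List.length_cons]

lemma pvC2_cons_false (p : String × String) (b : List (String × String))
    (h : (decide (PySem.Str.len p.2 > 0) && pvIsupper p.2) = false) : pvC2 (p :: b) = pvC2 b + 1 := by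
  simp only [pvC2, List.findIdx?_cons, h, Bool.false_eq_true, if_false]
  cases hb : b.findIdx? (fun p => decide (PySem.Str.len p.2 > 0) && pvIsupper p.2) <;>
    simp [List.length_cons]

-- the core: A's found-phase loop computes B's min-of-cuts slice
lemma loop_core (l : List String) : ∀ acc : List String, acc.length ≤ 10 →
    (pvLoopA true acc l).2 =
      acc ++ ((pvBody l).take (min (min (pvC1 (pvBody l)) (pvC2 (pvBody l))) (11 - acc.length))).map Prod.fst := by
  induction l with
  | nil => intro acc _; simp [pvLoopA, pvBody]
  | cons line rest ih =>
    intro acc hacc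
    rw [pvBody_cons]
    by_cases hh : pvIsHeaderB line = true
    · simp only [pvLoopA, headerCond_eq, hh, if_pos]
      exact ih acc hacc
    · simp only [hh, Bool.false_eq_true, if_false]
      by_cases hsu : pvShortUpperB line = true
      · -- short-uppercase line: stop, excluded
        have hc1 : pvC1 ((line, pvNx rest) :: pvBody rest) = 0 := by
          simp only [pvC1, List.findIdx?_cons, hsu]
          rfl
        have hmin : min (min (pvC1 ((line, pvNx rest) :: pvBody rest))
            (pvC2 ((line, pvNx rest) :: pvBody rest))) (11 - acc.length) = 0 := by
          rw [hc1]; omega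
        rw [hmin]
        simp only [pvLoopA, headerCond_eq, hh, Bool.false_eq_true, if_false, if_true]
        rw [if_pos (by simpa [pvShortUpperB] using hsu)]
        simp
      · have hsu' : ¬ (decide (PySem.Str.len (PySem.Str.strip line) > 0) && pvIsupper (PySem.Str.strip line)
            && decide (PySem.Str.len (PySem.Str.strip line) < 30)) = true := by
          simpa [pvShortUpperB] using hsu
        have hc1 : pvC1 ((line, pvNx rest) :: pvBody rest) = pvC1 (pvBody rest) + 1 :=
          pvC1_cons_false _ _ (by simpa [pvShortUpperB] using hsu)
        by_cases hlk : (decide (PySem.Str.len (pvNx rest) > 0) && pvIsupper (pvNx rest)) = true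
        · -- lookahead stop: append then break
          have hc2 : pvC2 ((line, pvNx rest) :: pvBody rest) = 1 := by
            simp only [pvC2, List.findIdx?_cons, hlk]
            rfl
          have hmin : min (min (pvC1 ((line, pvNx rest) :: pvBody rest))
              (pvC2 ((line, pvNx rest) :: pvBody rest))) (11 - acc.length) = 1 := by
            rw [hc1, hc2]; omega
          rw [hmin]
          simp only [pvLoopA, headerCond_eq, hh, Bool.false_eq_true, if_false, if_true,
            if_neg hsu', look_eq, if_pos hlk]
          simp
        · have hc2 : pvC2 ((line, pvNx rest) :: pvBody rest) = pvC2 (pvBody rest) + 1 :=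
            pvC2_cons_false _ _ (by simpa using hlk)
          by_cases hcap : (acc ++ [line]).length > 10
          · -- cap reached after appending
            have hm : acc.length = 10 := by simp at hcap; omega
            have hmin : min (min (pvC1 ((line, pvNx rest) :: pvBody rest))
                (pvC2 ((line, pvNx rest) :: pvBody rest))) (11 - acc.length) = 1 := by
              rw [hc1, hc2]; omega
            rw [hmin]
            simp only [pvLoopA, headerCond_eq, hh, Bool.false_eq_true, if_false, if_true,
              if_neg hsu', look_eq, if_neg hlk, if_pos hcap]
            simp
          · -- keep going
            have hm : acc.length < 10 := by simp at hcap; omega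
            have hmin : min (min (pvC1 ((line, pvNx rest) :: pvBody rest))
                (pvC2 ((line, pvNx rest) :: pvBody rest))) (11 - acc.length)
                = min (min (pvC1 (pvBody rest)) (pvC2 (pvBody rest))) (11 - (acc ++ [line]).length) + 1 := by
              rw [hc1, hc2]
              simp only [List.length_append, List.length_cons, List.length_nil]
              omega
            rw [hmin]
            simp only [pvLoopA, headerCond_eq, hh, Bool.false_eq_true, if_false, if_true,
              if_neg hsu', look_eq, if_neg hlk, if_neg hcap]
            rw [ih (acc ++ [line]) (by simp; omega)]
            simp [List.take_succ_cons]

-- ===== VERDICT (by name: the statement is the Claim_ definition above) =====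
theorem extract_objective_section_spec : Claim_equal_extract_objective_section := by
  intro text _
  unfold Spec_extract_objective_section extract_objective_section extract_objective_section_alt
  simp only []
  generalize (PySem.Str.split? text "\n").getD [] = l
  rw [find_eq]
  cases hf : l.findIdx? pvIsHeaderB with
  | none => simp
  | some k =>
    have hb : ((l.drop (k + 1)).zip ((l.drop (k + 2)).map PySem.Str.strip ++ [""])).filter
        (fun p => !pvIsHeaderB p.1) = pvBody (l.drop (k + 1)) := by
      have h2 : l.drop (k + 2) = (l.drop (k + 1)).tail := by
        rw [List.tail_drop]
      rw [pvBody, h2]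
    rw [loop_core _ [] (by simp)]
    simp only [hb, pvLoopA_fst_true, List.nil_append, List.length_nil, Nat.sub_zero]
    simp
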